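-- pv_equiv track=rewrite | github.com/Programming-Seungwan/ALGORITHM_STUDY_PRIVATE | 2025/goorm/goorm-party.py | find_min_reachable_nodes
-- ===== SOURCE A (Python) =====
-- class UnionFind:
--     def __init__(self, size):
--         self.parent = list(range(size + 1))  # 1-based indexing
--
--     def find(self, x):
--         if self.parent[x] != x:
--             self.parent[x] = self.find(self.parent[x])  # 경로 압축
--         return self.parent[x]
--
--     def union(self, x, y):
--         px = self.find(x)
--         py = self.find(y)
--         if px == py:
--             return
--         # 작은 번호가 루트가 되도록
--         if px < py:
--             self.parent[py] = px
--         else: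
--             self.parent[px] = py
--
-- def find_min_reachable_nodes(n, edges):
--     uf = UnionFind(n)
--     for u, v in edges:
--         uf.union(u, v)
--
--     result = []
--     for i in range(1, n + 1):
--         result.append(uf.find(i))
--     return result
-- ===== SOURCE B (Python) =====
-- def find_min_reachable_nodes(n, edges):
--     # Label-propagation: lab[i] is the smallest label currently known to be in
--     # i's connected component; each edge merges the two classes by relabelling.
--     lab = list(range(n + 1))
--     for u, v in edges:
--         a, b = lab[u], lab[v]
--         if a != b:
--             m = a if a < b else b
--             lab = [m if x == a or x == b else x for x in lab]
--     return lab[1:]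
-- ===== Notes on version B (the rewrite author's own statement) =====
-- stated objective: simpler
-- what changed: Replaces the UnionFind class (recursive find with path compression, union by smaller root) with a flat label-propagation array: lab[i] holds the component's minimum label, and each edge merges two classes by one relabelling comprehension; no tree structure, no recursion.
import Mathlib
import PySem

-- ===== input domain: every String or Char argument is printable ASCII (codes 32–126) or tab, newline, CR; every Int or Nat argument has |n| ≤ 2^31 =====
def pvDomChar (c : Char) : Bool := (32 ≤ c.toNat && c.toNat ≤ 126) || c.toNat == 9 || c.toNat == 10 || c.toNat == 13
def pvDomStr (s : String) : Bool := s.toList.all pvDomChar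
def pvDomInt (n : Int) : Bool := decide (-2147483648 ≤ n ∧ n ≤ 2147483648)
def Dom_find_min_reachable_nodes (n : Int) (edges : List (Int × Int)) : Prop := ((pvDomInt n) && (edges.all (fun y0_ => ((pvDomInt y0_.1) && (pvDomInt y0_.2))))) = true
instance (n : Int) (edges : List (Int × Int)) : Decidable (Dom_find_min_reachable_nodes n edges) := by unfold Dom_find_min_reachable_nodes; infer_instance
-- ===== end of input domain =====

-- B replaces the UnionFind forest by a flat min-label array updated per edge; equivalence of the RETURN value.

-- ===== PORT A =====
-- UnionFind.find: `if parent[x] != x: parent[x] = find(parent[x]); return parent[x]`.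
-- The recursion has no structural measure, so it carries a fuel argument (parent.length + 1
-- at every call site, enough under Pre_); list reads/writes use the total pyGetD/pySetD
-- forms, exact wherever Python does not raise (Pre_ excludes the raising inputs).
def ufFind : Nat → List Int → Int → Int × List Int
  | 0, p, _ => (0, p)  -- fuel exhausted: unreachable under Pre_
  | f + 1, p, x =>
    let px := PySem.List.pyGetD p x 0
    if px ≠ x then
      let rq := ufFind f p px
      let p2 := PySem.List.pySetD rq.2 x rq.1
      (PySem.List.pyGetD p2 x 0, p2)
    else (px, p)

-- UnionFind.union
def ufUnion (p : List Int) (x y : Int) : List Int :=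
  let r1 := ufFind (p.length + 1) p x
  let r2 := ufFind (r1.2.length + 1) r1.2 y
  if r1.1 = r2.1 then r2.2
  else if r1.1 < r2.1 then PySem.List.pySetD r2.2 r2.1 r1.1
  else PySem.List.pySetD r2.2 r1.1 r2.1

def find_min_reachable_nodes (n : Int) (edges : List (Int × Int)) : List Int :=
  let p0 := PySem.List.pyRange 0 (n + 1) 1           -- self.parent = list(range(size + 1))
  let pF := edges.foldl (fun p e => ufUnion p e.1 e.2) p0
  (PySem.List.pyRange 1 (n + 1) 1).foldl
    (fun (st : List Int × List Int) i =>
      let r := ufFind (st.2.length + 1) st.2 i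
      (st.1 ++ [r.1], r.2))
    ([], pF) |>.1

-- ===== PORT B =====
-- one edge step: a, b = lab[u], lab[v]; if a != b: relabel by a comprehension
def bStep (lab : List Int) (e : Int × Int) : List Int :=
  let a := PySem.List.pyGetD lab e.1 0
  let b := PySem.List.pyGetD lab e.2 0
  if a ≠ b then
    let m := if a < b then a else b
    lab.map (fun x => if x = a ∨ x = b then m else x)
  else lab

def find_min_reachable_nodes_alt (n : Int) (edges : List (Int × Int)) : List Int :=
  let labF := edges.foldl bStep (PySem.List.pyRange 0 (n + 1) 1)
  PySem.List.slice labF (some 1) none                -- lab[1:]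

-- ===== PRECONDITION & SPEC =====
-- Pre_ excludes exactly the inputs on which Python A raises IndexError: an edge endpoint
-- outside the indexable range [-(n+1), n] of the parent list (for n < 0 that range is
-- empty, so any edge raises).
def Pre_find_min_reachable_nodes (n : Int) (edges : List (Int × Int)) : Prop :=
  ∀ e ∈ edges, (-(n + 1) ≤ e.1 ∧ e.1 ≤ n) ∧ (-(n + 1) ≤ e.2 ∧ e.2 ≤ n)
instance (n : Int) (edges : List (Int × Int)) : Decidable (Pre_find_min_reachable_nodes n edges) := by
  unfold Pre_find_min_reachable_nodes; infer_instance

def pvWitness_find_min_reachable_nodes : Int × (List (Int × Int)) := (5, [(1, 2), (4, 5)])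

def Spec_find_min_reachable_nodes (n : Int) (edges : List (Int × Int)) (out : List Int) : Prop := out = find_min_reachable_nodes_alt n edges
instance (n : Int) (edges : List (Int × Int)) (out : List Int) : Decidable (Spec_find_min_reachable_nodes n edges out) := by unfold Spec_find_min_reachable_nodes; infer_instance

-- ===== CLAIM (what is proved, stated in full; the proofs are below) =====
def Claim_equal_find_min_reachable_nodes : Prop := ∀ (n : Int) (edges : List (Int × Int)), Dom_find_min_reachable_nodes n edges → Pre_find_min_reachable_nodes n edges → Spec_find_min_reachable_nodes n edges (find_min_reachable_nodes n edges)

-- ===== LEMMAS AND PROOFS =====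

-- canonical (wrapped) index of x in a list of length len
def cIdx (len : Nat) (x : Int) : Nat := if 0 ≤ x then x.toNat else len - (-x).toNat

-- parent pointer read as a Nat
def idx (p : List Int) (i : Nat) : Nat := (p.getD i 0).toNat

-- structural invariant of the parent array: entries are canonical and never increase
def UFInv (p : List Int) : Prop := ∀ i, i < p.length → 0 ≤ p.getD i 0 ∧ p.getD i 0 ≤ (i : Int)

-- root chase with fuel
def rootN (p : List Int) : Nat → Nat → Nat
  | 0, i => i
  | f + 1, i => if idx p i = i then i else rootN p f (idx p i)

def Root (p : List Int) (i : Nat) : Nat := rootN p (i + 1) i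

lemma idx_le {p : List Int} (h : UFInv p) {i : Nat} (hi : i < p.length) : idx p i ≤ i := by
  have := h i hi; unfold idx; omega

lemma idx_cast {p : List Int} (h : UFInv p) {i : Nat} (hi : i < p.length) :
    p.getD i 0 = (idx p i : Int) := by
  have := h i hi; unfold idx; omega

lemma rootN_stable {p : List Int} (h : UFInv p) :
    ∀ i f g, i < p.length → i < f → i < g → rootN p f i = rootN p g i := by
  intro i
  induction i using Nat.strong_induction_on with
  | _ i ih =>
    intro f g hi hf hg
    obtain ⟨f, rfl⟩ : ∃ f', f = f' + 1 := ⟨f - 1, by omega⟩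
    obtain ⟨g, rfl⟩ : ∃ g', g = g' + 1 := ⟨g - 1, by omega⟩
    simp only [rootN]
    by_cases hroot : idx p i = i
    · simp [hroot]
    · have hlt : idx p i < i := Nat.lt_of_le_of_ne (idx_le h hi) hroot
      simp only [hroot]
      exact ih _ hlt _ _ (lt_of_le_of_lt (idx_le h hi) hi) (by omega) (by omega)

lemma root_unfold {p : List Int} (h : UFInv p) {i : Nat} (hi : i < p.length) :
    Root p i = if idx p i = i then i else Root p (idx p i) := by
  by_cases hroot : idx p i = i
  · simp [Root, rootN, hroot]
  · have hlt : idx p i < i := Nat.lt_of_le_of_ne (idx_le h hi) hroot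
    rw [if_neg hroot, Root, Root, rootN, if_neg hroot]
    exact rootN_stable h _ _ _ (lt_of_lt_of_le hlt (le_of_lt hi)) (by omega) (by omega)

lemma root_le {p : List Int} (h : UFInv p) : ∀ i, i < p.length → Root p i ≤ i := by
  intro i
  induction i using Nat.strong_induction_on with
  | _ i ih =>
    intro hi
    rw [root_unfold h hi]
    by_cases hroot : idx p i = i
    · simp [hroot]
    · have hlt : idx p i < i := Nat.lt_of_le_of_ne (idx_le h hi) hroot
      simp only [if_neg hroot]
      exact le_trans (ih _ hlt (by omega)) (by omega)

lemma root_lt {p : List Int} (h : UFInv p) {i : Nat} (hi : i < p.length) : Root p i < p.length :=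
  lt_of_le_of_lt (root_le h i hi) hi

lemma root_fix {p : List Int} (h : UFInv p) : ∀ i, i < p.length → idx p (Root p i) = Root p i := by
  intro i
  induction i using Nat.strong_induction_on with
  | _ i ih =>
    intro hi
    rw [root_unfold h hi]
    by_cases hroot : idx p i = i
    · simp [hroot]
    · have hlt : idx p i < i := Nat.lt_of_le_of_ne (idx_le h hi) hroot
      simp only [if_neg hroot]
      exact ih _ hlt (by omega)

lemma root_of_fix {p : List Int} (h : UFInv p) {i : Nat} (hi : i < p.length)
    (hfix : idx p i = i) : Root p i = i := by rw [root_unfold h hi]; simp [hfix]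


lemma getD_set_ne (p : List Int) (a j : Nat) (v : Int) (hne : a ≠ j) :
    (p.set a v).getD j 0 = p.getD j 0 := by
  simp [List.getD_eq_getElem?_getD, hne]

lemma getD_set_self (p : List Int) (a : Nat) (v : Int) (h : a < p.length) :
    (p.set a v).getD a 0 = v := by
  simp [List.getD_eq_getElem?_getD, h]

lemma idx_set {p : List Int} {a b : Nat} (ha : a < p.length) :
    ∀ i, idx (p.set a (b : Int)) i = if i = a then b else idx p i := by
  intro i
  by_cases hia : i = a
  · subst hia; rw [idx, getD_set_self _ _ _ ha, if_pos rfl]; simp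
  · rw [idx, getD_set_ne _ _ _ _ (Ne.symm hia), if_neg hia, idx]

-- the one mutation both find (path compression) and union perform: p[a] := b with b a root;
-- unified root-rewriting lemma
lemma root_set {p : List Int} (h : UFInv p) {a b : Nat} (ha : a < p.length) (hba : b ≤ a)
    (hbr : idx p b = b) (hcase : b = Root p a ∨ a = Root p a) :
    UFInv (p.set a (b : Int)) ∧
      ∀ i, i < p.length → Root (p.set a (b : Int)) i = if Root p i = Root p a then b else Root p i := by
  have hlen : (p.set a (b : Int)).length = p.length := by simp
  have hidx : ∀ i, idx (p.set a (b : Int)) i = if i = a then b else idx p i := idx_set ha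
  have hq : UFInv (p.set a (b : Int)) := by
    intro i hi
    rw [hlen] at hi
    by_cases hia : i = a
    · subst hia
      rw [getD_set_self _ _ _ ha]
      constructor <;> [exact Int.natCast_nonneg b; exact_mod_cast hba]
    · rw [getD_set_ne _ _ _ _ (Ne.symm hia)]
      exact h i hi
  refine ⟨hq, ?_⟩
  intro i
  induction i using Nat.strong_induction_on with
  | _ i ih =>
    intro hi
    have hiq : i < (p.set a (b : Int)).length := by omega
    rw [root_unfold hq hiq, hidx i]
    by_cases hia : i = a
    · rw [if_pos hia]
      have hcond : Root p i = Root p a := by rw [hia]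
      rw [if_pos hcond]
      by_cases hbi : b = i
      · rw [if_pos hbi]; exact hbi.symm
      · rw [if_neg hbi]
        have hblt : b < i := lt_of_le_of_ne (hia ▸ hba) hbi
        have hbl : b < p.length := lt_trans hblt hi
        have := ih b hblt hbl
        rw [this, root_of_fix h hbl hbr]
        simp
    · rw [if_neg hia]
      by_cases hfix : idx p i = i
      · rw [if_pos hfix]
        have hri : Root p i = i := root_of_fix h hi hfix
        by_cases hc : Root p i = Root p a
        · rw [if_pos hc]
          rcases hcase with hcb | hca
          · omega
          · exfalso; apply hia; omega
        · rw [if_neg hc, hri]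
      · rw [if_neg hfix]
        have hlt : idx p i < i := Nat.lt_of_le_of_ne (idx_le h hi) hfix
        have hjl : idx p i < p.length := lt_trans hlt hi
        rw [ih (idx p i) hlt hjl]
        have hpi : Root p i = Root p (idx p i) := by rw [root_unfold h hi, if_neg hfix]
        rw [hpi]

lemma fix_of_root {p : List Int} (h : UFInv p) {b : Nat} (hb : b < p.length)
    (hr : Root p b = b) : idx p b = b := by
  by_contra hne
  have hlt : idx p b < b := Nat.lt_of_le_of_ne (idx_le h hb) hne
  have : Root p b = Root p (idx p b) := by rw [root_unfold h hb, if_neg hne]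
  have := root_le h (idx p b) (lt_trans hlt hb)
  omega

lemma root_root {p : List Int} (h : UFInv p) {i : Nat} (hi : i < p.length) :
    Root p (Root p i) = Root p i :=
  root_of_fix h (root_lt h hi) (root_fix h i hi)

-- find: returns the root, preserves length, UFInv, and every root
lemma find_go {p : List Int} (h : UFInv p) :
    ∀ i : Nat, i < p.length → ∀ f, i < f →
      (ufFind f p (i : Int)).1 = (Root p i : Int) ∧
      (ufFind f p (i : Int)).2.length = p.length ∧ UFInv (ufFind f p (i : Int)).2 ∧
      ∀ j, j < p.length → Root (ufFind f p (i : Int)).2 j = Root p j := by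
  intro i
  induction i using Nat.strong_induction_on with
  | _ i ih =>
    intro hi f hf
    obtain ⟨g, rfl⟩ : ∃ g, f = g + 1 := ⟨f - 1, by omega⟩
    have hpx : PySem.List.pyGetD p (i : Int) 0 = (idx p i : Int) := by
      rw [PySem.List.pyGetD_natCast]; exact (idx_cast h hi).symm ▸ rfl
    by_cases hfix : idx p i = i
    · simp only [ufFind, hpx, hfix]
      rw [if_neg (by simp : ¬((i : Int) ≠ (i : Int)))]
      exact ⟨by rw [root_of_fix h hi hfix], rfl, h, fun j _ => rfl⟩
    · have hlt : idx p i < i := Nat.lt_of_le_of_ne (idx_le h hi) hfix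
      have hjl : idx p i < p.length := lt_trans hlt hi
      have hne : ((idx p i : Nat) : Int) ≠ (i : Int) := by
        intro hh; exact hfix (by exact_mod_cast hh)
      obtain ⟨h1, h2, h3, h4⟩ := ih (idx p i) hlt hjl g (by omega)
      simp only [ufFind, hpx]
      rw [if_pos hne]
      set q := (ufFind g p ((idx p i : Nat) : Int)).2 with hqdef
      have hil : i < q.length := by omega
      have hb1 : Root p (idx p i) ≤ i := le_trans (root_le h (idx p i) hjl) (le_of_lt hlt)
      have hbr : idx q (Root p (idx p i)) = Root p (idx p i) := by
        apply fix_of_root h3 (by have := root_lt h hjl; omega)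
        rw [h4 _ (root_lt h hjl)]
        exact root_root h hjl
      have hpi : Root p i = Root p (idx p i) := by rw [root_unfold h hi, if_neg hfix]
      have hcase : Root p (idx p i) = Root q i ∨ i = Root q i := by
        left; rw [h4 _ hi, hpi]
      obtain ⟨hq2, hq3⟩ := root_set h3 hil hb1 hbr hcase
      have hset : PySem.List.pySetD q (i : Int) (ufFind g p ((idx p i : Nat) : Int)).1
          = q.set i ((Root p (idx p i) : Nat) : Int) := by
        rw [h1, PySem.List.pySetD_natCast]
      rw [hset]
      refine ⟨?_, by simpa using h2, hq2, ?_⟩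
      · rw [PySem.List.pyGetD_natCast, getD_set_self _ _ _ hil, hpi]
      · intro j hj
        rw [hq3 j (by omega), h4 j hj, h4 i hi, ← hpi]
        split_ifs with hc
        · omega
        · rfl

lemma cIdx_lt {len : Nat} {x : Int} (h1 : -(len : Int) ≤ x) (h2 : x < len) :
    cIdx len x < len := by
  rw [cIdx]; split_ifs with hx <;> omega

lemma pyGetD_cIdx {p : List Int} {x : Int} (h1 : -(p.length : Int) ≤ x) (h2 : x < p.length) :
    PySem.List.pyGetD p x 0 = p.getD (cIdx p.length x) 0 := by
  by_cases hx : 0 ≤ x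
  · obtain ⟨k, rfl⟩ : ∃ k : Nat, x = (k : Int) := ⟨x.toNat, by omega⟩
    rw [PySem.List.pyGetD_natCast, cIdx]
    simp
  · rw [cIdx, if_neg hx]
    simp only [PySem.List.pyGetD, PySem.List.pyGet?, PySem.List.pyIdx?, if_neg hx, if_pos h1]
    simp [List.getD_eq_getElem?_getD]

lemma pySetD_cIdx {p : List Int} {x : Int} (v : Int)
    (h1 : -(p.length : Int) ≤ x) (h2 : x < p.length) :
    PySem.List.pySetD p x v = p.set (cIdx p.length x) v := by
  by_cases hx : 0 ≤ x
  · obtain ⟨k, rfl⟩ : ∃ k : Nat, x = (k : Int) := ⟨x.toNat, by omega⟩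
    rw [PySem.List.pySetD_natCast, cIdx]
    simp
  · rw [cIdx, if_neg hx]
    simp [PySem.List.pySetD, PySem.List.pySet?, PySem.List.pyIdx?, hx, h1]

lemma root_eq_root_idx {p : List Int} (h : UFInv p) {c : Nat} (hc : c < p.length) :
    Root p c = Root p (idx p c) := by
  by_cases hf : idx p c = c
  · rw [hf]
  · rw [root_unfold h hc, if_neg hf]

-- top-level find on a possibly negative Python index
lemma find_int {p : List Int} (h : UFInv p) {x : Int}
    (h1 : -(p.length : Int) ≤ x) (h2 : x < p.length) :
    (ufFind (p.length + 1) p x).1 = (Root p (cIdx p.length x) : Int) ∧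
    (ufFind (p.length + 1) p x).2.length = p.length ∧ UFInv (ufFind (p.length + 1) p x).2 ∧
    ∀ j, j < p.length → Root (ufFind (p.length + 1) p x).2 j = Root p j := by
  by_cases hx : 0 ≤ x
  · obtain ⟨k, rfl⟩ : ∃ k : Nat, x = (k : Int) := ⟨x.toNat, by omega⟩
    have hcx : cIdx p.length (k : Int) = k := by rw [cIdx]; simp
    rw [hcx]
    exact find_go h k (by omega) (p.length + 1) (by omega)
  · -- negative index: one unfold, then find_go on the canonical index
    have hc : cIdx p.length x < p.length := cIdx_lt h1 h2
    have hpx : PySem.List.pyGetD p x 0 = (idx p (cIdx p.length x) : Int) := by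
      rw [pyGetD_cIdx h1 h2]; exact (idx_cast h hc).symm ▸ rfl
    have hne : ((idx p (cIdx p.length x) : Nat) : Int) ≠ x := by
      have := Int.natCast_nonneg (idx p (cIdx p.length x)); omega
    set c := cIdx p.length x with hcdef
    have hjl : idx p c < p.length := lt_of_le_of_lt (idx_le h hc) hc
    obtain ⟨h1', h2', h3', h4'⟩ := find_go h (idx p c) hjl p.length (lt_of_le_of_lt (idx_le h hc) hc)
    simp only [ufFind, hpx]
    rw [if_pos hne]
    set q := (ufFind p.length p ((idx p c : Nat) : Int)).2 with hqdef
    have hcl : c < q.length := by omega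
    have hb1 : Root p (idx p c) ≤ c := le_trans (root_le h (idx p c) hjl) (idx_le h hc)
    have hbr : idx q (Root p (idx p c)) = Root p (idx p c) := by
      apply fix_of_root h3' (by have := root_lt h hjl; omega)
      rw [h4' _ (root_lt h hjl)]
      exact root_root h hjl
    have hpi : Root p c = Root p (idx p c) := root_eq_root_idx h hc
    have hcase : Root p (idx p c) = Root q c ∨ c = Root q c := by
      left; rw [h4' _ hc, hpi]
    obtain ⟨hq2, hq3⟩ := root_set h3' hcl hb1 hbr hcase
    have hset : PySem.List.pySetD q x (ufFind p.length p ((idx p c : Nat) : Int)).1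
        = q.set c ((Root p (idx p c) : Nat) : Int) := by
      rw [h1', pySetD_cIdx _ (by omega) (by omega), h2', ← hcdef]
    rw [hset]
    refine ⟨?_, by simpa using h2', hq2, ?_⟩
    · have hlq : (q.set c ((Root p (idx p c) : Nat) : Int)).length = p.length := by
        rw [List.length_set]; exact h2'
      rw [pyGetD_cIdx (by omega) (by omega), hlq, ← hcdef, getD_set_self _ _ _ hcl, hpi]
    · intro j hj
      rw [hq3 j (by omega), h4' j hj, h4' c hc, ← hpi]
      split_ifs with hcnd
      · omega
      · rfl

-- union: merges the two classes, the smaller root winning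
lemma union_roots {p : List Int} (h : UFInv p) {x y : Int}
    (hx1 : -(p.length : Int) ≤ x) (hx2 : x < p.length)
    (hy1 : -(p.length : Int) ≤ y) (hy2 : y < p.length) :
    (ufUnion p x y).length = p.length ∧ UFInv (ufUnion p x y) ∧
      ∀ j, j < p.length →
        Root (ufUnion p x y) j =
          if Root p j = Root p (cIdx p.length x) ∨ Root p j = Root p (cIdx p.length y) then
            min (Root p (cIdx p.length x)) (Root p (cIdx p.length y))
          else Root p j := by
  obtain ⟨ha1, ha2, ha3, ha4⟩ := find_int h hx1 hx2
  set q1 := (ufFind (p.length + 1) p x).2 with hq1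
  have hy1' : -(q1.length : Int) ≤ y := by omega
  have hy2' : y < (q1.length : Int) := by omega
  obtain ⟨hb1, hb2, hb3, hb4⟩ := find_int ha3 hy1' hy2'
  set q2 := (ufFind (q1.length + 1) q1 y).2 with hq2
  set rx := Root p (cIdx p.length x) with hrx
  set ry := Root p (cIdx p.length y) with hry
  have hrxl : rx < p.length := root_lt h (cIdx_lt hx1 hx2)
  have hryl : ry < p.length := root_lt h (cIdx_lt hy1 hy2)
  have hcy : cIdx q1.length y = cIdx p.length y := by rw [ha2]
  have hb1' : (ufFind (q1.length + 1) q1 y).1 = (ry : Int) := by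
    rw [hb1, hcy, ha4 _ (cIdx_lt hy1 hy2)]
  have hq24 : ∀ j, j < p.length → Root q2 j = Root p j := fun j hj =>
    (hb4 j (by omega)).trans (ha4 j hj)
  have hq2len : q2.length = p.length := by omega
  have hUn : ufUnion p x y =
      if (rx : Int) = (ry : Int) then q2
      else if (rx : Int) < (ry : Int) then q2.set ry ((rx : Nat) : Int)
      else q2.set rx ((ry : Nat) : Int) := by
    simp only [ufUnion, ← hq1, ← hq2, ha1, hb1']
    split_ifs <;> first | rfl | rw [PySem.List.pySetD_natCast]
  rw [hUn]
  by_cases heq : rx = ry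
  · rw [if_pos (by exact_mod_cast heq)]
    refine ⟨hq2len, hb3, ?_⟩
    intro j hj
    rw [hq24 j hj]
    split_ifs with hc <;> omega
  · rw [if_neg (by exact_mod_cast heq)]
    have hfix : ∀ r : Nat, r < p.length → Root p r = r → idx q2 r = r := by
      intro r hr hrr
      apply fix_of_root hb3 (by omega)
      rw [hq24 r hr, hrr]
    rcases Nat.lt_or_ge rx ry with hlt | hge
    · rw [if_pos (by exact_mod_cast hlt)]
      have hbr : idx q2 rx = rx := hfix rx hrxl (root_root h (cIdx_lt hx1 hx2))
      have hcase : rx = Root q2 ry ∨ ry = Root q2 ry := by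
        right; rw [hq24 ry hryl, root_root h (cIdx_lt hy1 hy2)]
      obtain ⟨hI, hR⟩ := root_set hb3 (by omega) (le_of_lt hlt) hbr hcase
      refine ⟨by simpa using hq2len, hI, ?_⟩
      intro j hj
      rw [hR j (by omega), hq24 j hj, hq24 ry hryl, root_root h (cIdx_lt hy1 hy2)]
      split_ifs with h1 h2 <;> omega
    · have hlt' : ry < rx := by omega
      rw [if_neg (by exact_mod_cast not_lt.mpr hge)]
      have hbr : idx q2 ry = ry := hfix ry hryl (root_root h (cIdx_lt hy1 hy2))
      have hcase : ry = Root q2 rx ∨ rx = Root q2 rx := by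
        right; rw [hq24 rx hrxl, root_root h (cIdx_lt hx1 hx2)]
      obtain ⟨hI, hR⟩ := root_set hb3 (by omega) (le_of_lt hlt') hbr hcase
      refine ⟨by simpa using hq2len, hI, ?_⟩
      intro j hj
      rw [hR j (by omega), hq24 j hj, hq24 rx hrxl, root_root h (cIdx_lt hx1 hx2)]
      split_ifs with h1 h2 <;> omega

-- B's labels track A's roots
def Agrees (p lab : List Int) : Prop :=
  lab.length = p.length ∧ ∀ j, j < p.length → lab.getD j 0 = (Root p j : Int)

lemma step_agrees {p lab : List Int} (h : UFInv p) (hA : Agrees p lab) {e : Int × Int}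
    (he : (-(p.length : Int) ≤ e.1 ∧ e.1 < p.length) ∧ (-(p.length : Int) ≤ e.2 ∧ e.2 < p.length)) :
    UFInv (ufUnion p e.1 e.2) ∧ (ufUnion p e.1 e.2).length = p.length ∧
      Agrees (ufUnion p e.1 e.2) (bStep lab e) := by
  obtain ⟨hlen, hval⟩ := hA
  obtain ⟨⟨he11, he12⟩, ⟨he21, he22⟩⟩ := he
  obtain ⟨hUlen, hUInv, hUroot⟩ := union_roots h he11 he12 he21 he22
  set rx := Root p (cIdx p.length e.1) with hrx
  set ry := Root p (cIdx p.length e.2) with hry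
  have hrxl : rx < p.length := root_lt h (cIdx_lt he11 he12)
  have hryl : ry < p.length := root_lt h (cIdx_lt he21 he22)
  have hga : PySem.List.pyGetD lab e.1 0 = (rx : Int) := by
    rw [pyGetD_cIdx (by omega) (by omega), hlen, hval _ (cIdx_lt he11 he12)]
  have hgb : PySem.List.pyGetD lab e.2 0 = (ry : Int) := by
    rw [pyGetD_cIdx (by omega) (by omega), hlen, hval _ (cIdx_lt he21 he22)]
  refine ⟨hUInv, hUlen, ?_⟩
  simp only [bStep, hga, hgb]
  by_cases heq : rx = ry
  · rw [if_neg (by simp [heq])]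
    refine ⟨by omega, ?_⟩
    intro j hj
    rw [hUlen] at hj
    rw [hval j hj, hUroot j hj]
    split_ifs with hc <;> (simp; try omega)
  · rw [if_pos (by exact_mod_cast heq)]
    constructor
    · rw [List.length_map]; omega
    · intro j hj
      rw [hUlen] at hj
      have hjr : Root p j < p.length := root_lt h hj
      have hmap : (lab.map fun z => if z = (rx : Int) ∨ z = (ry : Int) then
            (if (rx : Int) < (ry : Int) then (rx : Int) else (ry : Int)) else z).getD j 0
          = (fun z => if z = (rx : Int) ∨ z = (ry : Int) then
            (if (rx : Int) < (ry : Int) then (rx : Int) else (ry : Int)) else z) (lab.getD j 0) := by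
        have hj' : j < lab.length := by omega
        have : lab[j]? = some lab[j] := List.getElem?_eq_getElem hj'
        simp [List.getD_eq_getElem?_getD, this]
      rw [hmap, hval j (by omega), hUroot j (by omega)]
      simp only
      split_ifs <;> push_cast <;> omega

lemma fold_agrees {p lab : List Int} (h : UFInv p) (hA : Agrees p lab) (edges : List (Int × Int))
    (he : ∀ e ∈ edges, (-(p.length : Int) ≤ e.1 ∧ e.1 < p.length) ∧ (-(p.length : Int) ≤ e.2 ∧ e.2 < p.length)) :
    UFInv (edges.foldl (fun q e => ufUnion q e.1 e.2) p) ∧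
      (edges.foldl (fun q e => ufUnion q e.1 e.2) p).length = p.length ∧
      Agrees (edges.foldl (fun q e => ufUnion q e.1 e.2) p) (edges.foldl bStep lab) := by
  induction edges generalizing p lab with
  | nil => exact ⟨h, rfl, hA⟩
  | cons e es ih =>
    obtain ⟨hI, hL, hAg⟩ := step_agrees h hA (he e (List.mem_cons_self))
    simp only [List.foldl_cons]
    obtain ⟨a1, a2, a3⟩ := ih hI hAg (fun e' he' => by
      have := he e' (List.mem_cons_of_mem _ he')
      constructor <;> constructor <;> omega)
    exact ⟨a1, by omega, a3⟩

-- A's result loop: appends Root p i for i in range(1, n+1), roots being preserved throughout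
lemma result_fold :
    ∀ (is acc p : List Int), UFInv p → (∀ i ∈ is, 0 ≤ i ∧ i < (p.length : Int)) →
      (is.foldl (fun (st : List Int × List Int) i =>
          let r := ufFind (st.2.length + 1) st.2 i
          (st.1 ++ [r.1], r.2)) (acc, p)).1
        = acc ++ is.map (fun i => (Root p i.toNat : Int)) := by
  intro is
  induction is with
  | nil => intro acc p h _; simp
  | cons i is ih =>
    intro acc p h hb
    obtain ⟨hi0, hil⟩ := hb i (List.mem_cons_self)
    obtain ⟨hf1, hf2, hf3, hf4⟩ := find_int h (x := i) (by omega) (by omega)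
    have hci : cIdx p.length i = i.toNat := by rw [cIdx, if_pos hi0]
    simp only [List.foldl_cons]
    rw [ih _ _ hf3 (fun i' hi' => by have := hb i' (List.mem_cons_of_mem _ hi'); omega)]
    rw [hf1, hci]
    have hmc : is.map (fun i' => (Root (ufFind (p.length + 1) p i).2 i'.toNat : Int))
        = is.map (fun i' => (Root p i'.toNat : Int)) := by
      apply List.map_congr_left
      intro i' hi'
      have := hb i' (List.mem_cons_of_mem _ hi')
      rw [hf4 i'.toNat (by omega)]
    rw [hmc]
    simp

-- ===== VERDICT (by name: the statement is the Claim_ definition above) =====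
theorem find_min_reachable_nodes_spec : Claim_equal_find_min_reachable_nodes := by
  intro n edges _ hPre
  unfold Spec_find_min_reachable_nodes
  have eA : find_min_reachable_nodes n edges =
      ((PySem.List.pyRange 1 (n + 1) 1).foldl
        (fun (st : List Int × List Int) i =>
          let r := ufFind (st.2.length + 1) st.2 i
          (st.1 ++ [r.1], r.2))
        ([], edges.foldl (fun p e => ufUnion p e.1 e.2) (PySem.List.pyRange 0 (n + 1) 1))).1 := rfl
  have eB : find_min_reachable_nodes_alt n edges =
      PySem.List.slice (edges.foldl bStep (PySem.List.pyRange 0 (n + 1) 1)) (some 1) none := rfl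
  rw [eA, eB, PySem.List.slice_from_one]
  by_cases hn : 0 ≤ n
  · set L := n.toNat + 1 with hL
    have hn1 : n + 1 = ((L : Nat) : Int) := by omega
    have hp0 : PySem.List.pyRange 0 (n + 1) 1 = (List.range L).map (fun k : Nat => (k : Int)) := by
      rw [hn1, PySem.List.pyRange_zero_natCast]
    rw [hp0]
    set p0 := (List.range L).map (fun k : Nat => (k : Int)) with hp0def
    have hp0len : p0.length = L := by rw [hp0def]; simp
    have hp0get : ∀ i, i < L → p0.getD i 0 = (i : Int) := by
      intro i hi
      rw [hp0def]
      exact PySem.List.getD_map_range _ _ _ _ hi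
    have hInv0 : UFInv p0 := by
      intro i hi
      rw [hp0len] at hi
      rw [hp0get i hi]
      omega
    have hroot0 : ∀ i, i < L → Root p0 i = i := fun i hi =>
      root_of_fix hInv0 (by omega) (by rw [idx, hp0get i hi]; simp)
    have hA0 : Agrees p0 p0 :=
      ⟨rfl, fun j hj => by rw [hp0len] at hj; rw [hp0get j hj, hroot0 j hj]⟩
    have hbounds : ∀ e ∈ edges,
        (-(p0.length : Int) ≤ e.1 ∧ e.1 < p0.length) ∧
          (-(p0.length : Int) ≤ e.2 ∧ e.2 < p0.length) := by
      intro e he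
      have := hPre e he
      rw [hp0len]
      constructor <;> constructor <;> omega
    obtain ⟨hIF, hLF, hAF⟩ := fold_agrees hInv0 hA0 edges hbounds
    set pF := edges.foldl (fun q e => ufUnion q e.1 e.2) p0 with hpF
    set labF := edges.foldl bStep p0 with hlabF
    have hpFlen : pF.length = L := by rw [hLF, hp0len]
    rw [result_fold _ [] pF hIF (by
      intro i hi
      rw [PySem.List.mem_pyRange_one] at hi
      rw [hpFlen]
      omega)]
    have hlabLen : labF.length = L := by rw [hAF.1, hpFlen]
    have hlab : ∀ j, j < L → labF.getD j 0 = ((Root pF j : Nat) : Int) := by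
      intro j hj
      exact hAF.2 j (by omega)
    have hpr1 : p0 = 0 :: PySem.List.pyRange 1 (n + 1) 1 := by
      rw [← hp0, PySem.List.pyRange_one_cons (by omega : (0:Int) < n + 1)]
      norm_num
    have hprlen : (PySem.List.pyRange 1 (n + 1) 1).length = L - 1 := by
      have h5 : p0.length = (0 :: PySem.List.pyRange 1 (n + 1) 1).length := by rw [← hpr1]
      rw [hp0len, List.length_cons] at h5
      omega
    apply List.ext_getElem
    · simp [hprlen, hlabLen]
    · intro k hk1 hk2
      simp only [List.getElem_map, List.nil_append]
      have hkL : k < L - 1 := by simpa [hprlen] using hk1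
      have h2 : (PySem.List.pyRange 1 (n + 1) 1)[k]? = some ((k : Int) + 1) := by
        have h3 : p0[k + 1]? = some ((k : Int) + 1) := by
          rw [hp0def]
          rw [List.getElem?_map, List.getElem?_range (by omega : k + 1 < L)]
          simp only [Option.map_some, Option.some.injEq]
          push_cast
          ring
        rw [hpr1] at h3
        simpa using h3
      have hpr_k : (PySem.List.pyRange 1 (n + 1) 1)[k]'(by omega) = ((k : Int) + 1) := by
        rw [List.getElem?_eq_getElem (by omega)] at h2
        exact Option.some.inj h2
      rw [hpr_k]
      have htail : labF.tail[k]'(by simpa [hlabLen] using hk2)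
          = labF[k + 1]'(by rw [hlabLen]; omega) := by
        rw [List.getElem_tail]
      rw [htail]
      have := hlab (k + 1) (by omega)
      rw [List.getD_eq_getElem?_getD, List.getElem?_eq_getElem (by rw [hlabLen]; omega)] at this
      simp only [Option.getD_some] at this
      rw [this]
      try congr 1
      try omega
  · have hedges : edges = [] := by
      cases edges with
      | nil => rfl
      | cons e es =>
        exfalso
        have := hPre e List.mem_cons_self
        omega
    subst hedges
    have hr1 : PySem.List.pyRange 1 (n + 1) 1 = [] := by
      rw [PySem.List.pyRange]
      simp only [if_neg (by norm_num : ¬(1:Int) = 0)]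
      rw [if_pos (by norm_num : (0:Int) < 1), if_neg (by omega : ¬(1:Int) < n + 1)]
      simp
    have hr0 : PySem.List.pyRange 0 (n + 1) 1 = [] := by
      rw [PySem.List.pyRange]
      simp only [if_neg (by norm_num : ¬(1:Int) = 0)]
      rw [if_pos (by norm_num : (0:Int) < 1), if_neg (by omega : ¬(0:Int) < n + 1)]
      simp
    rw [hr0, hr1]
    simp
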